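-- pv_equiv track=rewrite | github.com/hydrays/NewMathAnalysis | Volume1/post_process.py | add_title_numbers
-- ===== SOURCE A (Python) =====
-- def add_title_numbers(content, chapter_num):
--     """
--     为markdown内容添加标题编号
--     """
--     lines = content.split('\n')
--     processed_lines = []
--
--     # 计数器
--     section_counter = 0
--     subsection_counter = 0
--     subsubsection_counter = 0
--
--     for line in lines:
--         # 检查标题级别
--         if line.startswith('# '):
--             # 一级标题：第X章
--             processed_lines.append(f"# 第{chapter_num}章 {line[2:].strip()}")
--             # 重置计数器
--             section_counter = 0
--             subsection_counter = 0
--             subsubsection_counter = 0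
--
--         elif line.startswith('## '):
--             # 二级标题：X.1, X.2, ...
--             section_counter += 1
--             subsection_counter = 0
--             subsubsection_counter = 0
--             processed_lines.append(f"## {chapter_num}.{section_counter} {line[3:].strip()}")
--
--         elif line.startswith('### '):
--             # 三级标题：X.1.1, X.1.2, ...
--             subsection_counter += 1
--             subsubsection_counter = 0
--             processed_lines.append(f"### {chapter_num}.{section_counter}.{subsection_counter} {line[4:].strip()}")
--
--         elif line.startswith('#### '):
--             # 四级标题：X.1.1.1, X.1.1.2, ...
--             subsubsection_counter += 1
--             processed_lines.append(f"#### {chapter_num}.{section_counter}.{subsection_counter}.{subsubsection_counter} {line[5:].strip()}")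
--
--         else:
--             # 其他行保持不变
--             processed_lines.append(line)
--
--     return '\n'.join(processed_lines)
-- ===== SOURCE B (Python) =====
-- def split_segments(lines, mark):
--     """Split lines into (pre, [(heading, body), ...]) at lines starting with mark."""
--     pre, segs, cur = [], [], None
--     for line in lines:
--         if line.startswith(mark):
--             segs.append((line, []))
--             cur = segs[-1][1]
--         elif cur is None:
--             pre.append(line)
--         else:
--             cur.append(line)
--     return pre, segs
--
--
-- def number(lines, level, prefix, start=0):
--     """Hierarchically number headings of `level`..4; `start` = headings of this
--     level already numbered in the enclosing scope (0 except in recursion)."""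
--     if level > 4:
--         return list(lines)
--     mark = '#' * level + ' '
--     pre, segs = split_segments(lines, mark)
--     out = number(pre, level + 1, prefix + (start,))
--     k = start + 1
--     for head, body in segs:
--         out = out + (['#' * level + ' ' + '.'.join(str(x) for x in prefix + (k,)) + ' ' + head[level + 1:].strip()] + number(body, level + 1, prefix + (k,)))
--         k = k + 1
--     return out
--
--
-- def add_title_numbers(content, chapter_num):
--     pre, segs = split_segments(content.split('\n'), '# ')
--     out = number(pre, 2, (chapter_num,))
--     for head, body in segs:
--         out = out + ([f"# 第{chapter_num}章 {head[2:].strip()}"] + number(body, 2, (chapter_num,)))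
--     return '\n'.join(out)
-- ===== Notes on version B (the rewrite author's own statement) =====
-- stated objective: alternative
-- what changed: Replaces A's single pass with three running counters reset at shallower headings by a hierarchical divide-and-conquer: the line list is split into segments at each heading level (split_segments), segment headings are numbered by enumeration, and bodies are processed recursively one level deeper.
import Mathlib
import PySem

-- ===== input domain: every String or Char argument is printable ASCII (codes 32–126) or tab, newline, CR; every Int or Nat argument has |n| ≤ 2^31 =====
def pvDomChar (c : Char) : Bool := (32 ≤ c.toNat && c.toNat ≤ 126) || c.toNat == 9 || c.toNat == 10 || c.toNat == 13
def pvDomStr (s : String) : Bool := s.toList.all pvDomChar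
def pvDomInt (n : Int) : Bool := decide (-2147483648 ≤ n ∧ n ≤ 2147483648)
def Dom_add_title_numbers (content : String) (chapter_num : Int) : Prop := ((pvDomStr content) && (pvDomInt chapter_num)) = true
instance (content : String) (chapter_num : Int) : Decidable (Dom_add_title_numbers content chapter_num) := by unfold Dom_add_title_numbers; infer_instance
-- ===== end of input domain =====

-- B replaces A's single counter-carrying pass by a hierarchical decomposition: split the
-- lines into segments at each heading level and number segments by enumeration, recursing
-- into the bodies (objective: alternative, same cost).

-- ===== PORT A =====
-- A's loop body: the four-way if/elif ladder over startswith tests, with three scalar counters.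
def pvStepA (ch : Int) (st : Int × Int × Int × List (List Char)) (line : List Char) :
    Int × Int × Int × List (List Char) :=
  if PySem.Chars.startswith line ['#', ' '] then
    (0, 0, 0, st.2.2.2 ++ [['#', ' ', '第'] ++ PySem.Int.toChars ch ++ ['章', ' '] ++
      PySem.Chars.strip (PySem.List.slice line (some 2) none)])
  else if PySem.Chars.startswith line ['#', '#', ' '] then
    (st.1 + 1, 0, 0, st.2.2.2 ++ [['#', '#', ' '] ++ PySem.Int.toChars ch ++ ['.'] ++
      PySem.Int.toChars (st.1 + 1) ++ [' '] ++ PySem.Chars.strip (PySem.List.slice line (some 3) none)])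
  else if PySem.Chars.startswith line ['#', '#', '#', ' '] then
    (st.1, st.2.1 + 1, 0, st.2.2.2 ++ [['#', '#', '#', ' '] ++ PySem.Int.toChars ch ++ ['.'] ++
      PySem.Int.toChars st.1 ++ ['.'] ++ PySem.Int.toChars (st.2.1 + 1) ++ [' '] ++
      PySem.Chars.strip (PySem.List.slice line (some 4) none)])
  else if PySem.Chars.startswith line ['#', '#', '#', '#', ' '] then
    (st.1, st.2.1, st.2.2.1 + 1, st.2.2.2 ++ [['#', '#', '#', '#', ' '] ++ PySem.Int.toChars ch ++ ['.'] ++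
      PySem.Int.toChars st.1 ++ ['.'] ++ PySem.Int.toChars st.2.1 ++ ['.'] ++
      PySem.Int.toChars (st.2.2.1 + 1) ++ [' '] ++ PySem.Chars.strip (PySem.List.slice line (some 5) none)])
  else
    (st.1, st.2.1, st.2.2.1, st.2.2.2 ++ [line])

def add_title_numbers (content : String) (chapter_num : Int) : String :=
  String.ofList (PySem.Chars.join ['\n']
    (((PySem.Chars.splitOn content.toList ['\n']).foldl (pvStepA chapter_num)
      (0, 0, 0, [])).2.2.2))

-- ===== PORT B =====
-- Source B's split_segments loop body (cur is None ⟺ no heading seen yet ⟺ segs empty).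
def pvSplitStep (mark : List Char)
    (st : List (List Char) × List (List Char × List (List Char))) (line : List Char) :
    List (List Char) × List (List Char × List (List Char)) :=
  if PySem.Chars.startswith line mark then (st.1, st.2 ++ [(line, [])])
  else match st.2 with
    | [] => (st.1 ++ [line], st.2)
    | _ => (st.1, pvAppendLast st.2 line)
where
  -- 'cur.append(line)': append to the body of the last segment
  pvAppendLast : List (List Char × List (List Char)) → List Char →
      List (List Char × List (List Char))
  | [], _ => []
  | [(h, b)], l => [(h, b ++ [l])]
  | x :: y :: t, l => x :: pvAppendLast (y :: t) l

def pvSplitSegments (lines : List (List Char)) (mark : List Char) :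
    List (List Char) × List (List Char × List (List Char)) :=
  lines.foldl (pvSplitStep mark) ([], [])

-- Source B's number(lines, level, prefix, start): recursive hierarchical numbering.
def pvNumber (lines : List (List Char)) (level : Nat) (pfx : List Int) (start : Int) :
    List (List Char) :=
  if _h : 4 < level then lines
  else
    let ps := pvSplitSegments lines (List.replicate level '#' ++ [' '])
    pvNumber ps.1 (level + 1) (pfx ++ [start]) 0 ++
      (PySem.List.enumerate ps.2 (start + 1)).flatMap
        (fun ke =>
          (List.replicate level '#' ++ [' '] ++
              PySem.Chars.join ['.'] ((pfx ++ [ke.1]).map PySem.Int.toChars) ++ [' '] ++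
              PySem.Chars.strip (PySem.List.slice ke.2.1 (some ((level : Int) + 1)) none)) ::
            pvNumber ke.2.2 (level + 1) (pfx ++ [ke.1]) 0)
termination_by 5 - level
decreasing_by all_goals omega

-- Source B's top-level list construction (split at '# ', 第X章 headings, recurse at level 2).
def pvTopOut (ch : Int) (lines : List (List Char)) : List (List Char) :=
  let ps := pvSplitSegments lines ['#', ' ']
  pvNumber ps.1 2 [ch] 0 ++
    ps.2.flatMap
      (fun hb =>
        (['#', ' ', '第'] ++ PySem.Int.toChars ch ++ ['章', ' '] ++
            PySem.Chars.strip (PySem.List.slice hb.1 (some 2) none)) ::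
          pvNumber hb.2 2 [ch] 0)

def add_title_numbers_alt (content : String) (chapter_num : Int) : String :=
  String.ofList (PySem.Chars.join ['\n']
    (pvTopOut chapter_num (PySem.Chars.splitOn content.toList ['\n'])))

-- ===== PRECONDITION & SPEC =====
def Spec_add_title_numbers (content : String) (chapter_num : Int) (out : String) : Prop := out = add_title_numbers_alt content chapter_num
instance (content : String) (chapter_num : Int) (out : String) : Decidable (Spec_add_title_numbers content chapter_num out) := by unfold Spec_add_title_numbers; infer_instance

-- ===== CLAIM (what is proved, stated in full; the proofs are below) =====
def Claim_equal_add_title_numbers : Prop := ∀ (content : String) (chapter_num : Int), Dom_add_title_numbers content chapter_num → Spec_add_title_numbers content chapter_num (add_title_numbers content chapter_num)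

-- ===== LEMMAS AND PROOFS =====

-- Recursive characterisation of split_segments' tail once a heading has been seen.
def pvSegsFrom (mark h : List Char) (b : List (List Char)) :
    List (List Char) → List (List Char × List (List Char))
  | [] => [(h, b)]
  | l :: t =>
    if PySem.Chars.startswith l mark then (h, b) :: pvSegsFrom mark l [] t
    else pvSegsFrom mark h (b ++ [l]) t

theorem pvAppendLast_append (segs : List (List Char × List (List Char))) (h : List Char)
    (b : List (List Char)) (l : List Char) :
    pvSplitStep.pvAppendLast (segs ++ [(h, b)]) l = segs ++ [(h, b ++ [l])] := by
  induction segs with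
  | nil => simp [pvSplitStep.pvAppendLast]
  | cons x t ih => cases t <;> simp_all [pvSplitStep.pvAppendLast]

theorem pvFoldSegs (mark : List Char) :
    ∀ (lines : List (List Char)) (pre : List (List Char))
      (segs : List (List Char × List (List Char))) (h : List Char) (b : List (List Char)),
      lines.foldl (pvSplitStep mark) (pre, segs ++ [(h, b)]) =
        (pre, segs ++ pvSegsFrom mark h b lines) := by
  intro lines
  induction lines with
  | nil => intro pre segs h b; simp [pvSegsFrom]
  | cons l t ih =>
    intro pre segs h b
    by_cases hl : PySem.Chars.startswith l mark
    · simp only [List.foldl_cons, pvSplitStep, hl, if_pos, pvSegsFrom]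
      rw [List.append_assoc] at *
      have := ih pre (segs ++ [(h, b)]) l []
      simpa [List.append_assoc] using this
    · have hne : segs ++ [(h, b)] ≠ [] := by simp
      simp only [List.foldl_cons, pvSplitStep, hl, pvSegsFrom]
      rw [if_neg (by simp [hl])]
      cases hs : segs ++ [(h, b)] with
      | nil => exact absurd hs hne
      | cons a s =>
        rw [← hs, pvAppendLast_append]
        exact ih pre segs h (b ++ [l])

theorem pvFoldSplit (mark : List Char) :
    ∀ (lines : List (List Char)) (pre : List (List Char)),
      lines.foldl (pvSplitStep mark) (pre, []) =
        (pre ++ (pvSplitSegments lines mark).1, (pvSplitSegments lines mark).2) := by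
  intro lines
  induction lines with
  | nil => intro pre; simp [pvSplitSegments]
  | cons l t ih =>
    intro pre
    have hstep : ∀ (q : List (List Char)), pvSplitStep mark (q, []) l =
        (if PySem.Chars.startswith l mark then (q, [(l, [])]) else (q ++ [l], [])) := by
      intro q
      by_cases hl : PySem.Chars.startswith l mark <;> simp [pvSplitStep, hl]
    simp only [pvSplitSegments, List.foldl_cons, hstep]
    by_cases hl : PySem.Chars.startswith l mark
    · rw [if_pos hl, if_pos hl]
      have h1 := pvFoldSegs mark t pre [] l []
      have h2 := pvFoldSegs mark t [] [] l []
      simp only [List.nil_append] at h1 h2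
      rw [h1, h2]
      simp
    · rw [if_neg hl, if_neg hl]
      simp only [List.nil_append]
      rw [ih (pre ++ [l]), ih [l]]
      simp

theorem pvSplit_cons_neg {mark l : List Char} (t : List (List Char))
    (hl : PySem.Chars.startswith l mark = false) :
    pvSplitSegments (l :: t) mark =
      (l :: (pvSplitSegments t mark).1, (pvSplitSegments t mark).2) := by
  simp only [pvSplitSegments, List.foldl_cons]
  rw [show pvSplitStep mark ([], []) l = ([l], []) from by simp [pvSplitStep, hl]]
  rw [pvFoldSplit mark t [l]]
  rfl

theorem pvSplit_cons_pos {mark l : List Char} (t : List (List Char))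
    (hl : PySem.Chars.startswith l mark = true) :
    pvSplitSegments (l :: t) mark = ([], pvSegsFrom mark l [] t) := by
  simp only [pvSplitSegments, List.foldl_cons, pvSplitStep, hl, if_pos]
  have := pvFoldSegs mark t [] [] l []
  simpa using this

theorem pvSplit_no {mark : List Char} :
    ∀ (lines : List (List Char)), (∀ l ∈ lines, PySem.Chars.startswith l mark = false) →
      pvSplitSegments lines mark = (lines, []) := by
  intro lines
  induction lines with
  | nil => intro _; rfl
  | cons l t ih =>
    intro hno
    rw [pvSplit_cons_neg t (hno l (by simp)), ih (fun x hx => hno x (by simp [hx]))]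

theorem pvSplit_decomp {mark h : List Char} (pre t : List (List Char))
    (hpre : ∀ l ∈ pre, PySem.Chars.startswith l mark = false)
    (hh : PySem.Chars.startswith h mark = true) :
    pvSplitSegments (pre ++ h :: t) mark = (pre, pvSegsFrom mark h [] t) := by
  induction pre with
  | nil => simpa using pvSplit_cons_pos t hh
  | cons p pre' ih =>
    rw [List.cons_append, pvSplit_cons_neg _ (hpre p (by simp)),
      ih (fun x hx => hpre x (by simp [hx]))]

theorem pvSegsFrom_eq (mark : List Char) :
    ∀ (t : List (List Char)) (h : List Char) (b : List (List Char)),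
      pvSegsFrom mark h b t =
        (h, b ++ (pvSplitSegments t mark).1) :: (pvSplitSegments t mark).2 := by
  intro t
  induction t with
  | nil => intro h b; simp [pvSegsFrom, pvSplitSegments]
  | cons l t' ih =>
    intro h b
    by_cases hl : PySem.Chars.startswith l mark
    · rw [pvSplit_cons_pos t' hl]
      simp [pvSegsFrom, hl, ih]
    · rw [pvSplit_cons_neg t' (by simpa using hl)]
      simp [pvSegsFrom, hl, ih]

-- One-step unfolding of pvNumber below the cutoff level.
theorem pvNumber_eq (lines : List (List Char)) (level : Nat) (pfx : List Int) (k : Int)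
    (hL : ¬ 4 < level) :
    pvNumber lines level pfx k =
      pvNumber (pvSplitSegments lines (List.replicate level '#' ++ [' '])).1 (level + 1)
          (pfx ++ [k]) 0 ++
        (PySem.List.enumerate (pvSplitSegments lines (List.replicate level '#' ++ [' '])).2
            (k + 1)).flatMap
          (fun ke =>
            (List.replicate level '#' ++ [' '] ++
                PySem.Chars.join ['.'] ((pfx ++ [ke.1]).map PySem.Int.toChars) ++ [' '] ++
                PySem.Chars.strip (PySem.List.slice ke.2.1 (some ((level : Int) + 1)) none)) ::
              pvNumber ke.2.2 (level + 1) (pfx ++ [ke.1]) 0) := by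
  rw [pvNumber]
  simp [hL]

theorem pvNumber_gt (lines : List (List Char)) (level : Nat) (pfx : List Int) (k : Int)
    (hL : 4 < level) : pvNumber lines level pfx k = lines := by
  rw [pvNumber]; simp [hL]

theorem pvNumber_no (lines : List (List Char)) (level : Nat) (pfx : List Int) (k : Int)
    (hL : ¬ 4 < level)
    (hno : ∀ l ∈ lines, PySem.Chars.startswith l (List.replicate level '#' ++ [' ']) = false) :
    pvNumber lines level pfx k = pvNumber lines (level + 1) (pfx ++ [k]) 0 := by
  rw [pvNumber_eq lines level pfx k hL, pvSplit_no lines hno]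
  simp [PySem.List.enumerate]

theorem pvNumber_split (pre : List (List Char)) (h : List Char) (t : List (List Char))
    (level : Nat) (pfx : List Int) (k : Int) (hL : ¬ 4 < level)
    (hpre : ∀ l ∈ pre, PySem.Chars.startswith l (List.replicate level '#' ++ [' ']) = false)
    (hh : PySem.Chars.startswith h (List.replicate level '#' ++ [' ']) = true) :
    pvNumber (pre ++ h :: t) level pfx k =
      pvNumber pre (level + 1) (pfx ++ [k]) 0 ++
        ((List.replicate level '#' ++ [' '] ++
            PySem.Chars.join ['.'] ((pfx ++ [k + 1]).map PySem.Int.toChars) ++ [' '] ++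
            PySem.Chars.strip (PySem.List.slice h (some ((level : Int) + 1)) none)) ::
          pvNumber t level pfx (k + 1)) := by
  rw [pvNumber_eq (pre ++ h :: t) level pfx k hL, pvNumber_eq t level pfx (k + 1) hL,
    pvSplit_decomp pre t hpre hh, pvSegsFrom_eq]
  simp [PySem.List.enumerate, List.append_assoc]

-- dropWhile's first element falsifies the predicate.
theorem pvDropWhile_head {α : Type} (p : α → Bool) :
    ∀ (l : List α) (h : α) (t : List α), l.dropWhile p = h :: t → p h = false := by
  intro l
  induction l with
  | nil => intro h t hd; simp at hd
  | cons a l' ih =>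
    intro h t hd
    by_cases ha : p a
    · rw [List.dropWhile_cons_of_pos ha] at hd; exact ih h t hd
    · rw [List.dropWhile_cons_of_neg ha] at hd
      cases hd; simpa using ha

-- ===== A-side fold characterisations, innermost scope outwards =====

theorem pvFoldA_plain (ch : Int) :
    ∀ (lines : List (List Char)),
      (∀ l ∈ lines, PySem.Chars.startswith l ['#', ' '] = false ∧
        PySem.Chars.startswith l ['#', '#', ' '] = false ∧
        PySem.Chars.startswith l ['#', '#', '#', ' '] = false ∧
        PySem.Chars.startswith l ['#', '#', '#', '#', ' '] = false) →
      ∀ (s u v : Int) (acc : List (List Char)),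
        lines.foldl (pvStepA ch) (s, u, v, acc) = (s, u, v, acc ++ lines) := by
  intro lines
  induction lines with
  | nil => intro _ s u v acc; simp
  | cons l t ih =>
    intro hno s u v acc
    obtain ⟨h1, h2, h3, h4⟩ := hno l (by simp)
    rw [List.foldl_cons, show pvStepA ch (s, u, v, acc) l = (s, u, v, acc ++ [l]) by
      simp [pvStepA, h1, h2, h3, h4]]
    rw [ih (fun x hx => hno x (by simp [hx]))]
    simp

theorem pvFoldA4 (ch : Int) :
    ∀ (n : Nat) (lines : List (List Char)), lines.length ≤ n →
      (∀ l ∈ lines, PySem.Chars.startswith l ['#', ' '] = false ∧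
        PySem.Chars.startswith l ['#', '#', ' '] = false ∧
        PySem.Chars.startswith l ['#', '#', '#', ' '] = false) →
      ∀ (s u k : Int) (acc : List (List Char)),
        ∃ v, lines.foldl (pvStepA ch) (s, u, k, acc) =
          (s, u, v, acc ++ pvNumber lines 4 [ch, s, u] k) := by
  intro n
  induction n with
  | zero =>
    intro lines hlen _ s u k acc
    rw [List.eq_nil_of_length_eq_zero (Nat.le_zero.mp hlen)]
    exact ⟨k, by simp [pvNumber_no [] 4 [ch, s, u] k (by norm_num) (by simp),
      pvNumber_gt [] 5 _ 0 (by norm_num)]⟩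
  | succ n ih =>
    intro lines hlen hno s u k acc
    have hdec := List.takeWhile_append_dropWhile
      (p := fun l => !PySem.Chars.startswith l ['#', '#', '#', '#', ' ']) (l := lines)
    set pre := lines.takeWhile (fun l => !PySem.Chars.startswith l ['#', '#', '#', '#', ' ']) with hpre_def
    have hpre : ∀ l ∈ pre, PySem.Chars.startswith l ['#', '#', '#', '#', ' '] = false := by
      intro l hl
      have := List.mem_takeWhile_imp hl
      simpa using this
    have hpre_mem : ∀ l ∈ pre, l ∈ lines := by
      intro l hl
      exact ((List.takeWhile_prefix _).sublist).subset hl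
    cases hrest : lines.dropWhile (fun l => !PySem.Chars.startswith l ['#', '#', '#', '#', ' ']) with
    | nil =>
      have hall : lines = pre := by rw [← hdec, hrest]; simp
      refine ⟨k, ?_⟩
      rw [pvFoldA_plain ch lines (fun l hl => ⟨(hno l hl).1, (hno l hl).2.1, (hno l hl).2.2,
        hpre l (hall ▸ hl)⟩) s u k acc]
      rw [pvNumber_no lines 4 [ch, s, u] k (by norm_num) (fun l hl => hpre l (hall ▸ hl)),
        pvNumber_gt lines 5 _ 0 (by norm_num)]
    | cons h t =>
      have hh : PySem.Chars.startswith h ['#', '#', '#', '#', ' '] = true := by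
        have := pvDropWhile_head _ lines h t hrest
        simpa using this
      have hlines : lines = pre ++ h :: t := by rw [← hdec, hrest]
      have hmem : ∀ l ∈ pre ++ h :: t, l ∈ lines := by rw [hlines]; exact fun l hl => hl
      have hlent : t.length ≤ n := by
        have := hlen; rw [hlines] at this; simp [List.length_append] at this; omega
      obtain ⟨hh1, hh2, hh3⟩ := hno h (hmem h (by simp))
      obtain ⟨v, hv⟩ := ih t hlent (fun l hl => hno l (hmem l (by simp [hl]))) s u (k + 1)
        (acc ++ pre ++ [['#', '#', '#', '#', ' '] ++ PySem.Int.toChars ch ++ ['.'] ++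
          PySem.Int.toChars s ++ ['.'] ++ PySem.Int.toChars u ++ ['.'] ++
          PySem.Int.toChars (k + 1) ++ [' '] ++ PySem.Chars.strip (PySem.List.slice h (some 5) none)])
      refine ⟨v, ?_⟩
      rw [hlines, List.foldl_append, List.foldl_cons]
      rw [pvFoldA_plain ch pre (fun l hl => ⟨(hno l (hpre_mem l hl)).1, (hno l (hpre_mem l hl)).2.1,
        (hno l (hpre_mem l hl)).2.2, hpre l hl⟩) s u k acc]
      rw [show pvStepA ch (s, u, k, acc ++ pre) h = (s, u, k + 1, (acc ++ pre) ++
        [['#', '#', '#', '#', ' '] ++ PySem.Int.toChars ch ++ ['.'] ++ PySem.Int.toChars s ++ ['.'] ++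
          PySem.Int.toChars u ++ ['.'] ++ PySem.Int.toChars (k + 1) ++ [' '] ++
          PySem.Chars.strip (PySem.List.slice h (some 5) none)]) from by
        simp [pvStepA, hh1, hh2, hh3, hh]]
      rw [show (acc ++ pre) ++ [['#', '#', '#', '#', ' '] ++ PySem.Int.toChars ch ++ ['.'] ++
          PySem.Int.toChars s ++ ['.'] ++ PySem.Int.toChars u ++ ['.'] ++
          PySem.Int.toChars (k + 1) ++ [' '] ++ PySem.Chars.strip (PySem.List.slice h (some 5) none)]
        = acc ++ pre ++ [['#', '#', '#', '#', ' '] ++ PySem.Int.toChars ch ++ ['.'] ++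
          PySem.Int.toChars s ++ ['.'] ++ PySem.Int.toChars u ++ ['.'] ++
          PySem.Int.toChars (k + 1) ++ [' '] ++ PySem.Chars.strip (PySem.List.slice h (some 5) none)]
        from by simp]
      rw [hv]
      rw [pvNumber_split pre h t 4 [ch, s, u] k (by norm_num) (fun l hl => by
          simpa using hpre l hl) (by simpa using hh)]
      rw [pvNumber_gt pre 5 _ 0 (by norm_num)]
      simp only [List.append_assoc, List.cons_append, List.nil_append]
      norm_num [PySem.Chars.join_cons_cons, PySem.Chars.join_singleton, List.append_assoc, List.replicate]

theorem pvFoldA3 (ch : Int) :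
    ∀ (n : Nat) (lines : List (List Char)), lines.length ≤ n →
      (∀ l ∈ lines, PySem.Chars.startswith l ['#', ' '] = false ∧
        PySem.Chars.startswith l ['#', '#', ' '] = false) →
      ∀ (s k : Int) (acc : List (List Char)),
        ∃ u v, lines.foldl (pvStepA ch) (s, k, 0, acc) =
          (s, u, v, acc ++ pvNumber lines 3 [ch, s] k) := by
  intro n
  induction n with
  | zero =>
    intro lines hlen _ s k acc
    rw [List.eq_nil_of_length_eq_zero (Nat.le_zero.mp hlen)]
    exact ⟨k, 0, by simp [pvNumber_no [] 3 [ch, s] k (by norm_num) (by simp),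
      pvNumber_no [] 4 _ 0 (by norm_num) (by simp), pvNumber_gt [] 5 _ 0 (by norm_num)]⟩
  | succ n ih =>
    intro lines hlen hno s k acc
    have hdec := List.takeWhile_append_dropWhile
      (p := fun l => !PySem.Chars.startswith l ['#', '#', '#', ' ']) (l := lines)
    set pre := lines.takeWhile (fun l => !PySem.Chars.startswith l ['#', '#', '#', ' ']) with hpre_def
    have hpre : ∀ l ∈ pre, PySem.Chars.startswith l ['#', '#', '#', ' '] = false := by
      intro l hl
      simpa using List.mem_takeWhile_imp hl
    have hpre_mem : ∀ l ∈ pre, l ∈ lines := by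
      intro l hl
      exact ((List.takeWhile_prefix _).sublist).subset hl
    cases hrest : lines.dropWhile (fun l => !PySem.Chars.startswith l ['#', '#', '#', ' ']) with
    | nil =>
      have hall : lines = pre := by rw [← hdec, hrest]; simp
      obtain ⟨v, hv⟩ := pvFoldA4 ch lines.length lines le_rfl
        (fun l hl => ⟨(hno l hl).1, (hno l hl).2, hpre l (hall ▸ hl)⟩) s k 0 acc
      refine ⟨k, v, ?_⟩
      rw [hv, pvNumber_no lines 3 [ch, s] k (by norm_num) (fun l hl => by
        simpa using hpre l (hall ▸ hl))]
      norm_num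
    | cons h t =>
      have hh : PySem.Chars.startswith h ['#', '#', '#', ' '] = true := by
        simpa using pvDropWhile_head _ lines h t hrest
      have hlines : lines = pre ++ h :: t := by rw [← hdec, hrest]
      have hmem : ∀ l ∈ pre ++ h :: t, l ∈ lines := by rw [hlines]; exact fun l hl => hl
      have hlent : t.length ≤ n := by
        have := hlen; rw [hlines] at this; simp [List.length_append] at this; omega
      obtain ⟨hh1, hh2⟩ := hno h (hmem h (by simp))
      obtain ⟨v1, hv1⟩ := pvFoldA4 ch pre.length pre le_rfl
        (fun l hl => ⟨(hno l (hpre_mem l hl)).1, (hno l (hpre_mem l hl)).2, hpre l hl⟩) s k 0 acc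
      obtain ⟨u, v, hv⟩ := ih t hlent (fun l hl => hno l (hmem l (by simp [hl]))) s (k + 1)
        (acc ++ pvNumber pre 4 [ch, s, k] 0 ++ [['#', '#', '#', ' '] ++ PySem.Int.toChars ch ++ ['.'] ++
          PySem.Int.toChars s ++ ['.'] ++ PySem.Int.toChars (k + 1) ++ [' '] ++
          PySem.Chars.strip (PySem.List.slice h (some 4) none)])
      refine ⟨u, v, ?_⟩
      rw [hlines, List.foldl_append, List.foldl_cons, hv1]
      rw [show pvStepA ch (s, k, v1, acc ++ pvNumber pre 4 [ch, s, k] 0) h = (s, k + 1, 0,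
        (acc ++ pvNumber pre 4 [ch, s, k] 0) ++ [['#', '#', '#', ' '] ++ PySem.Int.toChars ch ++ ['.'] ++
          PySem.Int.toChars s ++ ['.'] ++ PySem.Int.toChars (k + 1) ++ [' '] ++
          PySem.Chars.strip (PySem.List.slice h (some 4) none)]) from by
        simp [pvStepA, hh1, hh2, hh]]
      rw [show (acc ++ pvNumber pre 4 [ch, s, k] 0) ++ [['#', '#', '#', ' '] ++ PySem.Int.toChars ch ++ ['.'] ++
          PySem.Int.toChars s ++ ['.'] ++ PySem.Int.toChars (k + 1) ++ [' '] ++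
          PySem.Chars.strip (PySem.List.slice h (some 4) none)]
        = acc ++ pvNumber pre 4 [ch, s, k] 0 ++ [['#', '#', '#', ' '] ++ PySem.Int.toChars ch ++ ['.'] ++
          PySem.Int.toChars s ++ ['.'] ++ PySem.Int.toChars (k + 1) ++ [' '] ++
          PySem.Chars.strip (PySem.List.slice h (some 4) none)] from by simp]
      rw [hv]
      rw [pvNumber_split pre h t 3 [ch, s] k (by norm_num) (fun l hl => by
          simpa using hpre l hl) (by simpa using hh)]
      simp only [List.append_assoc, List.cons_append, List.nil_append]
      norm_num [PySem.Chars.join_cons_cons, PySem.Chars.join_singleton, List.append_assoc, List.replicate]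

theorem pvFoldA2 (ch : Int) :
    ∀ (n : Nat) (lines : List (List Char)), lines.length ≤ n →
      (∀ l ∈ lines, PySem.Chars.startswith l ['#', ' '] = false) →
      ∀ (k : Int) (acc : List (List Char)),
        ∃ s u v, lines.foldl (pvStepA ch) (k, 0, 0, acc) =
          (s, u, v, acc ++ pvNumber lines 2 [ch] k) := by
  intro n
  induction n with
  | zero =>
    intro lines hlen _ k acc
    rw [List.eq_nil_of_length_eq_zero (Nat.le_zero.mp hlen)]
    exact ⟨k, 0, 0, by simp [pvNumber_no [] 2 [ch] k (by norm_num) (by simp),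
      pvNumber_no [] 3 _ 0 (by norm_num) (by simp),
      pvNumber_no [] 4 _ 0 (by norm_num) (by simp), pvNumber_gt [] 5 _ 0 (by norm_num)]⟩
  | succ n ih =>
    intro lines hlen hno k acc
    have hdec := List.takeWhile_append_dropWhile
      (p := fun l => !PySem.Chars.startswith l ['#', '#', ' ']) (l := lines)
    set pre := lines.takeWhile (fun l => !PySem.Chars.startswith l ['#', '#', ' ']) with hpre_def
    have hpre : ∀ l ∈ pre, PySem.Chars.startswith l ['#', '#', ' '] = false := by
      intro l hl
      simpa using List.mem_takeWhile_imp hl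
    have hpre_mem : ∀ l ∈ pre, l ∈ lines := by
      intro l hl
      exact ((List.takeWhile_prefix _).sublist).subset hl
    cases hrest : lines.dropWhile (fun l => !PySem.Chars.startswith l ['#', '#', ' ']) with
    | nil =>
      have hall : lines = pre := by rw [← hdec, hrest]; simp
      obtain ⟨u, v, hv⟩ := pvFoldA3 ch lines.length lines le_rfl
        (fun l hl => ⟨(hno l hl), hpre l (hall ▸ hl)⟩) k 0 acc
      refine ⟨k, u, v, ?_⟩
      rw [hv, pvNumber_no lines 2 [ch] k (by norm_num) (fun l hl => by
        simpa using hpre l (hall ▸ hl))]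
      norm_num
    | cons h t =>
      have hh : PySem.Chars.startswith h ['#', '#', ' '] = true := by
        simpa using pvDropWhile_head _ lines h t hrest
      have hlines : lines = pre ++ h :: t := by rw [← hdec, hrest]
      have hmem : ∀ l ∈ pre ++ h :: t, l ∈ lines := by rw [hlines]; exact fun l hl => hl
      have hlent : t.length ≤ n := by
        have := hlen; rw [hlines] at this; simp [List.length_append] at this; omega
      have hh1 := hno h (hmem h (by simp))
      obtain ⟨u1, v1, hv1⟩ := pvFoldA3 ch pre.length pre le_rfl
        (fun l hl => ⟨(hno l (hpre_mem l hl)), hpre l hl⟩) k 0 acc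
      obtain ⟨s, u, v, hv⟩ := ih t hlent (fun l hl => hno l (hmem l (by simp [hl]))) (k + 1)
        (acc ++ pvNumber pre 3 [ch, k] 0 ++ [['#', '#', ' '] ++ PySem.Int.toChars ch ++ ['.'] ++
          PySem.Int.toChars (k + 1) ++ [' '] ++
          PySem.Chars.strip (PySem.List.slice h (some 3) none)])
      refine ⟨s, u, v, ?_⟩
      rw [hlines, List.foldl_append, List.foldl_cons, hv1]
      rw [show pvStepA ch (k, u1, v1, acc ++ pvNumber pre 3 [ch, k] 0) h = (k + 1, 0, 0,
        (acc ++ pvNumber pre 3 [ch, k] 0) ++ [['#', '#', ' '] ++ PySem.Int.toChars ch ++ ['.'] ++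
          PySem.Int.toChars (k + 1) ++ [' '] ++
          PySem.Chars.strip (PySem.List.slice h (some 3) none)]) from by
        simp [pvStepA, hh1, hh]]
      rw [show (acc ++ pvNumber pre 3 [ch, k] 0) ++ [['#', '#', ' '] ++ PySem.Int.toChars ch ++ ['.'] ++
          PySem.Int.toChars (k + 1) ++ [' '] ++
          PySem.Chars.strip (PySem.List.slice h (some 3) none)]
        = acc ++ pvNumber pre 3 [ch, k] 0 ++ [['#', '#', ' '] ++ PySem.Int.toChars ch ++ ['.'] ++
          PySem.Int.toChars (k + 1) ++ [' '] ++
          PySem.Chars.strip (PySem.List.slice h (some 3) none)] from by simp]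
      rw [hv]
      rw [pvNumber_split pre h t 2 [ch] k (by norm_num) (fun l hl => by
          simpa using hpre l hl) (by simpa using hh)]
      simp only [List.append_assoc, List.cons_append, List.nil_append]
      norm_num [PySem.Chars.join_cons_cons, PySem.Chars.join_singleton, List.append_assoc, List.replicate]

theorem pvTop_no (ch : Int) (lines : List (List Char))
    (hno : ∀ l ∈ lines, PySem.Chars.startswith l ['#', ' '] = false) :
    pvTopOut ch lines = pvNumber lines 2 [ch] 0 := by
  unfold pvTopOut
  rw [pvSplit_no lines hno]
  simp

theorem pvTop_split (ch : Int) (pre : List (List Char)) (h : List Char) (t : List (List Char))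
    (hpre : ∀ l ∈ pre, PySem.Chars.startswith l ['#', ' '] = false)
    (hh : PySem.Chars.startswith h ['#', ' '] = true) :
    pvTopOut ch (pre ++ h :: t) =
      pvNumber pre 2 [ch] 0 ++
        ((['#', ' ', '第'] ++ PySem.Int.toChars ch ++ ['章', ' '] ++
            PySem.Chars.strip (PySem.List.slice h (some 2) none)) :: pvTopOut ch t) := by
  unfold pvTopOut
  rw [pvSplit_decomp pre t hpre hh, pvSegsFrom_eq]
  simp [List.append_assoc]

theorem pvFoldA1 (ch : Int) :
    ∀ (n : Nat) (lines : List (List Char)), lines.length ≤ n →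
      ∀ (acc : List (List Char)),
        ∃ s u v, lines.foldl (pvStepA ch) (0, 0, 0, acc) =
          (s, u, v, acc ++ pvTopOut ch lines) := by
  intro n
  induction n with
  | zero =>
    intro lines hlen acc
    rw [List.eq_nil_of_length_eq_zero (Nat.le_zero.mp hlen)]
    refine ⟨0, 0, 0, ?_⟩
    rw [pvTop_no ch [] (by simp)]
    simp [pvNumber_no [] 2 [ch] 0 (by norm_num) (by simp),
      pvNumber_no [] 3 _ 0 (by norm_num) (by simp),
      pvNumber_no [] 4 _ 0 (by norm_num) (by simp), pvNumber_gt [] 5 _ 0 (by norm_num)]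
  | succ n ih =>
    intro lines hlen acc
    have hdec := List.takeWhile_append_dropWhile
      (p := fun l => !PySem.Chars.startswith l ['#', ' ']) (l := lines)
    set pre := lines.takeWhile (fun l => !PySem.Chars.startswith l ['#', ' ']) with hpre_def
    have hpre : ∀ l ∈ pre, PySem.Chars.startswith l ['#', ' '] = false := by
      intro l hl
      simpa using List.mem_takeWhile_imp hl
    cases hrest : lines.dropWhile (fun l => !PySem.Chars.startswith l ['#', ' ']) with
    | nil =>
      have hall : lines = pre := by rw [← hdec, hrest]; simp
      obtain ⟨s, u, v, hv⟩ := pvFoldA2 ch lines.length lines le_rfl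
        (fun l hl => hpre l (hall ▸ hl)) 0 acc
      exact ⟨s, u, v, by rw [hv, pvTop_no ch lines (fun l hl => hpre l (hall ▸ hl))]⟩
    | cons h t =>
      have hh : PySem.Chars.startswith h ['#', ' '] = true := by
        simpa using pvDropWhile_head _ lines h t hrest
      have hlines : lines = pre ++ h :: t := by rw [← hdec, hrest]
      have hlent : t.length ≤ n := by
        have := hlen; rw [hlines] at this; simp [List.length_append] at this; omega
      obtain ⟨s1, u1, v1, hv1⟩ := pvFoldA2 ch pre.length pre le_rfl hpre 0 acc
      obtain ⟨s, u, v, hv⟩ := ih t hlent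
        (acc ++ pvNumber pre 2 [ch] 0 ++ [['#', ' ', '第'] ++ PySem.Int.toChars ch ++ ['章', ' '] ++
          PySem.Chars.strip (PySem.List.slice h (some 2) none)])
      refine ⟨s, u, v, ?_⟩
      rw [hlines, List.foldl_append, List.foldl_cons, hv1]
      rw [show pvStepA ch (s1, u1, v1, acc ++ pvNumber pre 2 [ch] 0) h = (0, 0, 0,
        (acc ++ pvNumber pre 2 [ch] 0) ++ [['#', ' ', '第'] ++ PySem.Int.toChars ch ++ ['章', ' '] ++
          PySem.Chars.strip (PySem.List.slice h (some 2) none)]) from by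
        simp [pvStepA, hh]]
      rw [show (acc ++ pvNumber pre 2 [ch] 0) ++ [['#', ' ', '第'] ++ PySem.Int.toChars ch ++ ['章', ' '] ++
          PySem.Chars.strip (PySem.List.slice h (some 2) none)]
        = acc ++ pvNumber pre 2 [ch] 0 ++ [['#', ' ', '第'] ++ PySem.Int.toChars ch ++ ['章', ' '] ++
          PySem.Chars.strip (PySem.List.slice h (some 2) none)] from by simp]
      rw [hv]
      rw [pvTop_split ch pre h t hpre hh]
      simp [List.append_assoc]

-- ===== VERDICT (by name: the statement is the Claim_ definition above) =====
theorem add_title_numbers_spec : Claim_equal_add_title_numbers := by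
  intro content ch _
  unfold Spec_add_title_numbers add_title_numbers add_title_numbers_alt
  obtain ⟨s, u, v, hh⟩ := pvFoldA1 ch (PySem.Chars.splitOn content.toList ['\n']).length
    (PySem.Chars.splitOn content.toList ['\n']) le_rfl []
  rw [hh]
  simp
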